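-- pv_equiv track=rewrite | github.com/Jeongmin39/Algorithm | 프로그래머스/3/388354. 홀짝트리/홀짝트리.py | solution
-- ===== SOURCE A (Python) =====
-- from collections import defaultdict
--
-- def solution(nodes, edges):
--     parent = {node : node for node in nodes} # Union-Find의 부모 노드
--     edge_count = {node : 0 for node in nodes}
--
--     def find(x):
--         if parent[x] != x:
--             parent[x] = find(parent[x])
--         return parent[x]
--
--     def union(a, b):
--         root_a = find(a)
--         root_b = find(b)
--         if root_a != root_b:
--             parent[root_b] = root_a
--
--     # Union-Find 수행 및 각 노드의 간선 개수 계산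
--     for a, b in edges:
--         edge_count[a] += 1
--         edge_count[b] += 1
--         union(a, b)
--
--     # 각 트리 그룹별 정보 저장
--     tree_info = defaultdict(lambda: {'odd' : 0, 'even' : 0, 'reverse_odd' : 0, 'reverse_even' : 0})
--
--     for node in nodes:
--         root = find(node)
--         count = edge_count[node]
--         if node % 2 == 1 and count % 2 == 1:
--             tree_info[root]['odd'] += 1
--         elif node % 2 == 0 and count % 2 == 0:
--             tree_info[root]['even'] += 1
--         elif node % 2 == 1 and count % 2 == 0:
--             tree_info[root]['reverse_odd'] += 1
--         elif node % 2 == 0 and count % 2 == 1: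
--             tree_info[root]['reverse_even'] += 1
--
--     tree_count = 0
--     reverse_tree_count = 0
--
--     for info in tree_info.values():
--         if (info['odd'] == 1 and info['even'] == 0) or (info['odd'] == 0 and info['even'] == 1):
--             tree_count += 1
--         if (info['reverse_odd'] == 1 and info['reverse_even'] == 0) or (info['reverse_odd'] == 0 and info['reverse_even'] == 1):
--             reverse_tree_count += 1
--
--     return [tree_count, reverse_tree_count]
-- ===== SOURCE B (Python) =====
-- def solution(nodes, edges):
--     # Quick-find: comp maps each node to its component label; merging an edge
--     # relabels the smaller-id... (any) whole class in one scan.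
--     comp = {}
--     for node in nodes:
--         if node not in comp:
--             comp[node] = node
--
--     for e in edges:
--         a, b = e
--         la, lb = comp[a], comp[b]
--         if la != lb:
--             for k in comp:
--                 if comp[k] == lb:
--                     comp[k] = la
--
--     # degree parity per node (a separate single pass over the edges)
--     odd_deg = {node: False for node in comp}
--     for e in edges:
--         a, b = e
--         odd_deg[a] = not odd_deg[a]
--         odd_deg[b] = not odd_deg[b]
--
--     # per-component tallies: (odd, even, reverse_odd, reverse_even)
--     tally = {}
--     for node in nodes:
--         o, ev, ro, re = tally.get(comp[node], (0, 0, 0, 0))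
--         if node % 2 == 1:
--             if odd_deg[node]:
--                 o += 1
--             else:
--                 ro += 1
--         else:
--             if odd_deg[node]:
--                 re += 1
--             else:
--                 ev += 1
--         tally[comp[node]] = (o, ev, ro, re)
--
--     tree = sum(1 for o, ev, ro, re in tally.values()
--                if (o, ev) in ((1, 0), (0, 1)))
--     rev = sum(1 for o, ev, ro, re in tally.values()
--               if (ro, re) in ((1, 0), (0, 1)))
--     return [tree, rev]
-- ===== Notes on version B (the rewrite author's own statement) =====
-- stated objective: alternative
-- what changed: Replaces the recursive union-find with path compression by a quick-find that keeps a node-to-label dictionary and relabels a whole component with one scan per merging edge, computes degree parity by toggling booleans in a separate pass over the edges, and counts the qualifying components with filters over the tally values.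
import Mathlib
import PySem

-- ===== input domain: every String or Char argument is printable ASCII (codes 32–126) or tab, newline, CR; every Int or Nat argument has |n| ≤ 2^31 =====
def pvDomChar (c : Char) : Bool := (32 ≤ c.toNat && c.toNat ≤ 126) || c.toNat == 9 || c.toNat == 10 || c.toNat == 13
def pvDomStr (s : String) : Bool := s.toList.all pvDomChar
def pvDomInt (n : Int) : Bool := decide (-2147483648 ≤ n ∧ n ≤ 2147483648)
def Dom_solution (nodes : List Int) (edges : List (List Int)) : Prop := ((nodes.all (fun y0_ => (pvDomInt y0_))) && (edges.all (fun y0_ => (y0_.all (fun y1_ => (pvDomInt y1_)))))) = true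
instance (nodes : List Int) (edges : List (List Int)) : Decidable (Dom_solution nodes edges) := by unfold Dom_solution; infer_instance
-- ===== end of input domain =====

-- B replaces A's recursive union-find (path compression) by a quick-find that relabels a whole
-- component per edge and a separate degree-parity pass; same return value, alternative algorithm.

-- ===== PORT A =====
-- find(x) with path compression; recursion on fuel (nodes.length + 1 always suffices for the
-- acyclic parent forest A maintains).  parent[x] is read with getD x x (the key is present on
-- every admitted input, Pre_ below).
def findA : Nat → PySem.Dict Int Int → Int → Int × PySem.Dict Int Int
  | 0, p, x => (x, p)
  | f + 1, p, x =>
    let px := p.getD x x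
    if px ≠ x then
      let fr := findA f p px
      (fr.1, fr.2.insert x fr.1)
    else (x, p)

def unionA (f : Nat) (p : PySem.Dict Int Int) (a b : Int) : PySem.Dict Int Int :=
  let fa := findA f p a
  let fb := findA f fa.2 b
  if fa.1 ≠ fb.1 then fb.2.insert fb.1 fa.1 else fb.2

-- the four-way elif chain updating tree_info[root]; the record {'odd','even','reverse_odd',
-- 'reverse_even'} is ported as a 4-tuple in that key order
def bumpA (node count : Int) (r : Int × Int × Int × Int) : Int × Int × Int × Int :=
  if PySem.Int.mod node 2 = 1 ∧ PySem.Int.mod count 2 = 1 then (r.1 + 1, r.2.1, r.2.2.1, r.2.2.2)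
  else if PySem.Int.mod node 2 = 0 ∧ PySem.Int.mod count 2 = 0 then (r.1, r.2.1 + 1, r.2.2.1, r.2.2.2)
  else if PySem.Int.mod node 2 = 1 ∧ PySem.Int.mod count 2 = 0 then (r.1, r.2.1, r.2.2.1 + 1, r.2.2.2)
  else if PySem.Int.mod node 2 = 0 ∧ PySem.Int.mod count 2 = 1 then (r.1, r.2.1, r.2.2.1, r.2.2.2 + 1)
  else r

def solution (nodes : List Int) (edges : List (List Int)) : List Int :=
  let parent0 := nodes.foldl (fun d n => d.insert n n) (PySem.Dict.empty : PySem.Dict Int Int)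
  let ec0 := nodes.foldl (fun d n => d.insert n 0) (PySem.Dict.empty : PySem.Dict Int Int)
  let fuel := nodes.length + 1
  -- for a, b in edges: edge_count[a] += 1; edge_count[b] += 1; union(a, b)
  let st1 := edges.foldl (fun st e =>
      match e with
      | [a, b] =>
        let ec1 := st.2.insert a (st.2.getD a 0 + 1)
        let ec2 := ec1.insert b (ec1.getD b 0 + 1)
        (unionA fuel st.1 a b, ec2)
      | _ => st) (parent0, ec0)
  -- for node in nodes: root = find(node); tally tree_info[root]  (defaultdict access + field
  -- increment is ported as getD of the default record followed by insert)
  let st2 := nodes.foldl (fun st node =>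
      let fr := findA fuel st.1 node
      let count := st1.2.getD node 0
      (fr.2, st.2.insert fr.1 (bumpA node count (st.2.getD fr.1 (0, 0, 0, 0)))))
    (st1.1, (PySem.Dict.empty : PySem.Dict Int (Int × Int × Int × Int)))
  -- single pass over tree_info.values() accumulating both counters
  let tcrc := st2.2.values.foldl (fun acc i =>
      (acc.1 + (if (i.1 = 1 ∧ i.2.1 = 0) ∨ (i.1 = 0 ∧ i.2.1 = 1) then 1 else 0),
       acc.2 + (if (i.2.2.1 = 1 ∧ i.2.2.2 = 0) ∨ (i.2.2.1 = 0 ∧ i.2.2.2 = 1) then 1 else 0)))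
    ((0 : Int), (0 : Int))
  [tcrc.1, tcrc.2]

-- ===== PORT B =====
-- quick-find: one scan over the keys of comp relabels the whole class of lb to la
def relabelB (c : PySem.Dict Int Int) (la lb : Int) : PySem.Dict Int Int :=
  c.keys.foldl (fun c2 k => if c2.getD k k = lb then c2.insert k la else c2) c

def bumpB (node : Int) (od : Bool) (r : Int × Int × Int × Int) : Int × Int × Int × Int :=
  if PySem.Int.mod node 2 = 1 then
    (if od then (r.1 + 1, r.2.1, r.2.2.1, r.2.2.2) else (r.1, r.2.1, r.2.2.1 + 1, r.2.2.2))
  else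
    (if od then (r.1, r.2.1, r.2.2.1, r.2.2.2 + 1) else (r.1, r.2.1 + 1, r.2.2.1, r.2.2.2))

def solution_alt (nodes : List Int) (edges : List (List Int)) : List Int :=
  let comp0 := nodes.foldl (fun d n => if d.contains n then d else d.insert n n)
    (PySem.Dict.empty : PySem.Dict Int Int)
  -- a, b = e  (Pre_ guarantees every edge is a 2-element list, so e[0]/e[1] are exact here)
  let comp := edges.foldl (fun c e =>
      let a := e.headI
      let b := e.tail.headI
      let la := c.getD a a
      let lb := c.getD b b
      if la ≠ lb then relabelB c la lb else c) comp0
  let od0 := comp.keys.foldl (fun d n => d.insert n false)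
    (PySem.Dict.empty : PySem.Dict Int Bool)
  let od := edges.foldl (fun d e =>
      let a := e.headI
      let b := e.tail.headI
      let d1 := d.insert a (!(d.getD a false))
      d1.insert b (!(d1.getD b false))) od0
  let tally := nodes.foldl (fun t node =>
      let lab := comp.getD node node
      t.insert lab (bumpB node (od.getD node false) (t.getD lab (0, 0, 0, 0))))
    (PySem.Dict.empty : PySem.Dict Int (Int × Int × Int × Int))
  let tree := (tally.values.filter
      (fun i => decide ((i.1, i.2.1) = ((1 : Int), (0 : Int)) ∨ (i.1, i.2.1) = (0, 1)))).length
  let rev := (tally.values.filter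
      (fun i => decide ((i.2.2.1, i.2.2.2) = ((1 : Int), (0 : Int)) ∨ (i.2.2.1, i.2.2.2) = (0, 1)))).length
  [(tree : Int), (rev : Int)]

-- ===== PRECONDITION & SPEC =====
-- Pre_ excludes exactly the inputs where A raises: an edge that is not a 2-element list
-- (ValueError on unpacking) or an endpoint not in nodes (KeyError on edge_count[a]).
def Pre_solution (nodes : List Int) (edges : List (List Int)) : Prop :=
  ∀ e ∈ edges, ∃ a ∈ nodes, ∃ b ∈ nodes, e = [a, b]
instance (nodes : List Int) (edges : List (List Int)) : Decidable (Pre_solution nodes edges) := by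
  unfold Pre_solution; infer_instance

def pvWitness_solution : List Int × List (List Int) := ([1, 2, 3, 4], [[1, 2], [3, 4]])

def Spec_solution (nodes : List Int) (edges : List (List Int)) (out : List Int) : Prop := out = solution_alt nodes edges
instance (nodes : List Int) (edges : List (List Int)) (out : List Int) : Decidable (Spec_solution nodes edges out) := by unfold Spec_solution; infer_instance

-- ===== CLAIM (what is proved, stated in full; the proofs are below) =====
def Claim_equal_solution : Prop := ∀ (nodes : List Int) (edges : List (List Int)), Dom_solution nodes edges → Pre_solution nodes edges → Spec_solution nodes edges (solution nodes edges)

-- ===== LEMMAS AND PROOFS =====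

-- the parent dict viewed as a total function (identity off the keys)
def pf (p : PySem.Dict Int Int) : Int → Int := fun x => p.getD x x

-- fuel-bounded root / depth of the functional graph of g
def rootF : Nat → (Int → Int) → Int → Int
  | 0, _, x => x
  | f + 1, g, x => if g x = x then x else rootF f g (g x)

def dptF : Nat → (Int → Int) → Int → Nat
  | 0, _, _ => 0
  | f + 1, g, x => if g x = x then 0 else dptF f g (g x) + 1

-- g is identity outside nds, and its parent chains are acyclic
def Closed (nds : List Int) (g : Int → Int) : Prop := ∀ x, g x ≠ x → x ∈ nds ∧ g x ∈ nds
def Acy (g : Int → Int) : Prop := ∃ rk : Int → Nat, ∀ x, g x ≠ x → rk (g x) < rk x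
def Good (nds : List Int) (g : Int → Int) : Prop := Closed nds g ∧ Acy g

def Rt (nds : List Int) (g : Int → Int) (x : Int) : Int := rootF (nds.length + 1) g x
def Dpt (nds : List Int) (g : Int → Int) (x : Int) : Nat := dptF (nds.length + 1) g x

theorem good_induction {nds : List Int} {g : Int → Int} (hg : Good nds g) (P : Int → Prop)
    (hfix : ∀ x, g x = x → P x) (hstep : ∀ x, g x ≠ x → P (g x) → P x) : ∀ x, P x := by
  obtain ⟨-, rk, hrk⟩ := hg
  intro x
  induction h : rk x using Nat.strong_induction_on generalizing x with
  | _ n ih =>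
    by_cases hx : g x = x
    · exact hfix x hx
    · exact hstep x hx (ih (rk (g x)) (h ▸ hrk x hx) _ rfl)

theorem rootF_of_fix {g : Int → Int} {x : Int} (h : g x = x) : ∀ f, rootF f g x = x := by
  intro f; cases f <;> simp [rootF, h]

theorem depth_le {nds : List Int} {g : Int → Int} (hg : Good nds g) (x : Int) :
    ∃ d ≤ nds.length, g^[d + 1] x = g^[d] x := by
  by_contra hc
  push_neg at hc
  obtain ⟨hcl, rk, hrk⟩ := hg
  set L := nds.length with hL
  have hnf : ∀ i ≤ L, g (g^[i] x) ≠ g^[i] x := by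
    intro i hi
    have := hc i hi
    rwa [Function.iterate_succ_apply'] at this
  have key : ∀ i ≤ L, rk (g^[i + 1] x) < rk (g^[i] x) := by
    intro i hi
    rw [Function.iterate_succ_apply']
    exact hrk _ (hnf i hi)
  have hlt : ∀ j, j ≤ L + 1 → ∀ i, i < j → rk (g^[j] x) < rk (g^[i] x) := by
    intro j
    induction j with
    | zero => omega
    | succ j0 ih =>
      intro hj i hi
      have h1 : rk (g^[j0 + 1] x) < rk (g^[j0] x) := key j0 (by omega)
      rcases (by omega : i = j0 ∨ i < j0) with rfl | h
      · exact h1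
      · exact h1.trans (ih (by omega) i h)
  have hmem : ∀ i : Fin (L + 2), g^[(i : Nat)] x ∈ nds.toFinset := by
    intro ⟨i, hi⟩
    simp only [List.mem_toFinset]
    rcases (by omega : i ≤ L ∨ i = L + 1) with h | rfl
    · exact (hcl _ (hnf i h)).1
    · rw [Function.iterate_succ_apply']
      exact (hcl _ (hnf L (by omega))).2
  have hinj : Set.InjOn (fun i : Fin (L + 2) => g^[(i : Nat)] x) (Finset.univ : Finset (Fin (L + 2))) := by
    intro i _ j _ hij
    have hij' : g^[(i : Nat)] x = g^[(j : Nat)] x := hij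
    by_contra hne
    rcases (by omega : (i : Nat) < (j : Nat) ∨ (j : Nat) < (i : Nat)) with h | h
    · have := hlt j (by omega) i h
      rw [hij'] at this; omega
    · have := hlt i (by omega) j h
      rw [hij'] at this; omega
  have := Finset.card_le_card_of_injOn _ (fun i _ => hmem i) hinj
  have h2 := List.toFinset_card_le nds
  simp [Finset.card_univ] at this
  omega

theorem rootF_stab {g : Int → Int} :
    ∀ (d : Nat) (x : Int) (f f' : Nat), g^[d + 1] x = g^[d] x → d ≤ f → f ≤ f' →
      rootF f' g x = rootF f g x := by
  intro d
  induction d with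
  | zero =>
    intro x f f' h _ _
    have h' : g x = x := by simpa using h
    rw [rootF_of_fix h', rootF_of_fix h']
  | succ d ih =>
    intro x f f' h h1 h2
    by_cases hx : g x = x
    · rw [rootF_of_fix hx, rootF_of_fix hx]
    · obtain ⟨f0, rfl⟩ : ∃ f0, f = f0 + 1 := ⟨f - 1, by omega⟩
      obtain ⟨f0', rfl⟩ : ∃ k, f' = k + 1 := ⟨f' - 1, by omega⟩
      show rootF (f0' + 1) g x = rootF (f0 + 1) g x
      simp only [rootF, if_neg hx]
      refine ih (g x) f0 f0' ?_ (by omega) (by omega)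
      rw [← Function.iterate_succ_apply, ← Function.iterate_succ_apply]
      exact h

theorem rootF_isFix {g : Int → Int} :
    ∀ (d : Nat) (x : Int) (f : Nat), g^[d + 1] x = g^[d] x → d < f →
      g (rootF f g x) = rootF f g x := by
  intro d
  induction d with
  | zero =>
    intro x f h _
    have h' : g x = x := by simpa using h
    rw [rootF_of_fix h']; exact h' 
  | succ d ih =>
    intro x f h h1
    by_cases hx : g x = x
    · rw [rootF_of_fix hx]; exact hx
    · obtain ⟨f0, rfl⟩ : ∃ f0, f = f0 + 1 := ⟨f - 1, by omega⟩
      simp only [rootF, if_neg hx]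
      refine ih (g x) f0 ?_ (by omega)
      rw [← Function.iterate_succ_apply, ← Function.iterate_succ_apply]
      exact h

theorem dptF_of_fix {g : Int → Int} {x : Int} (h : g x = x) : ∀ f, dptF f g x = 0 := by
  intro f; cases f <;> simp [dptF, h]

theorem dptF_stab {g : Int → Int} :
    ∀ (d : Nat) (x : Int) (f f' : Nat), g^[d + 1] x = g^[d] x → d ≤ f → f ≤ f' →
      dptF f' g x = dptF f g x := by
  intro d
  induction d with
  | zero =>
    intro x f f' h _ _
    have h' : g x = x := by simpa using h
    rw [dptF_of_fix h', dptF_of_fix h']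
  | succ d ih =>
    intro x f f' h h1 h2
    by_cases hx : g x = x
    · rw [dptF_of_fix hx, dptF_of_fix hx]
    · obtain ⟨f0, rfl⟩ : ∃ f0, f = f0 + 1 := ⟨f - 1, by omega⟩
      obtain ⟨f0', rfl⟩ : ∃ k, f' = k + 1 := ⟨f' - 1, by omega⟩
      show dptF (f0' + 1) g x = dptF (f0 + 1) g x
      simp only [dptF, if_neg hx]
      refine congrArg (· + 1) (ih (g x) f0 f0' ?_ (by omega) (by omega))
      rw [← Function.iterate_succ_apply, ← Function.iterate_succ_apply]
      exact h

theorem Rt_isFix {nds : List Int} {g : Int → Int} (hg : Good nds g) (x : Int) :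
    g (Rt nds g x) = Rt nds g x := by
  obtain ⟨d, hd, hfix⟩ := depth_le hg x
  exact rootF_isFix d x _ hfix (by omega)

theorem Rt_of_fix {nds : List Int} {g : Int → Int} {x : Int} (h : g x = x) :
    Rt nds g x = x := rootF_of_fix h _

theorem Rt_step {nds : List Int} {g : Int → Int} (hg : Good nds g) {x : Int} (h : g x ≠ x) :
    Rt nds g x = Rt nds g (g x) := by
  obtain ⟨d, hd, hfix⟩ := depth_le hg (g x)
  unfold Rt
  rw [show rootF (nds.length + 1) g x = rootF nds.length g (g x) by simp [rootF, h]]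
  exact (rootF_stab d (g x) nds.length (nds.length + 1) hfix hd (by omega)).symm

theorem Rt_ne_self {nds : List Int} {g : Int → Int} (hg : Good nds g) {x : Int} (h : g x ≠ x) :
    Rt nds g x ≠ x := by
  intro he
  exact h (by calc g x = g (Rt nds g x) := by rw [he]
                  _ = Rt nds g x := Rt_isFix hg x
                  _ = x := he)

theorem Rt_mem {nds : List Int} {g : Int → Int} (hg : Good nds g) :
    ∀ x, x ∈ nds → Rt nds g x ∈ nds := by
  refine good_induction hg _ ?_ ?_
  · intro x hx hm; rwa [Rt_of_fix hx]
  · intro x hx ih hm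
    rw [Rt_step hg hx]
    exact ih (hg.1 x hx).2

theorem Dpt_step {nds : List Int} {g : Int → Int} (hg : Good nds g) {x : Int} (h : g x ≠ x) :
    Dpt nds g x = Dpt nds g (g x) + 1 := by
  obtain ⟨d, hd, hfix⟩ := depth_le hg (g x)
  unfold Dpt
  rw [show dptF (nds.length + 1) g x = dptF nds.length g (g x) + 1 by simp [dptF, h]]
  rw [dptF_stab d (g x) nds.length (nds.length + 1) hfix hd (by omega)]

theorem Dpt_of_fix {nds : List Int} {g : Int → Int} {x : Int} (h : g x = x) :
    Dpt nds g x = 0 := by simp [Dpt, dptF, h]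

theorem Rt_fix_of_Rt_eq {nds : List Int} {g : Int → Int} (hg : Good nds g) {x : Int}
    (h : Rt nds g x = x) : g x = x := by
  by_contra hx
  exact Rt_ne_self hg hx h

-- redirecting one entry of g stays closed on nds
theorem Closed_update {nds : List Int} {g : Int → Int} (hcl : Closed nds g) {x0 r : Int}
    (hx0 : x0 ∈ nds) (hrm : r ∈ nds) : Closed nds (Function.update g x0 r) := by
  intro z hz
  by_cases hzx : z = x0
  · subst hzx
    simp only [Function.update_self] at hz ⊢
    exact ⟨hx0, hrm⟩
  · rw [Function.update_of_ne hzx] at hz ⊢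
    exact hcl z hz

-- path compression step: a non-root entry redirected to a root of g stays acyclic
theorem Acy_update_compress {nds : List Int} {g : Int → Int} (hg : Good nds g) {x0 r : Int}
    (hr : g r = r) (hrx : r ≠ x0) (hx0 : g x0 ≠ x0) : Acy (Function.update g x0 r) := by
  refine ⟨Dpt nds g, ?_⟩
  intro z hz
  by_cases hzx : z = x0
  · subst hzx
    rw [Function.update_self]
    rw [Dpt_of_fix hr, Dpt_step hg hx0]
    omega
  · rw [Function.update_of_ne hzx] at hz ⊢
    rw [Dpt_step hg hz]
    omega

-- union step: a root redirected to another root stays acyclic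
theorem Acy_update_union {nds : List Int} {g : Int → Int} (hg : Good nds g) {x0 r : Int}
    (hx0 : g x0 = x0) (hr : g r = r) (hrx : r ≠ x0) : Acy (Function.update g x0 r) := by
  refine ⟨fun z => Dpt nds g z + (if Rt nds g z = x0 then 1 else 0), ?_⟩
  intro z hz
  beta_reduce
  by_cases hzx : z = x0
  · subst hzx
    rw [Function.update_self]
    rw [Dpt_of_fix hr, Dpt_of_fix hx0, Rt_of_fix hr, Rt_of_fix hx0]
    simp [hrx]
  · rw [Function.update_of_ne hzx] at hz ⊢
    rw [Dpt_step hg hz, Rt_step hg hz]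
    omega

theorem Rt_update {nds : List Int} {g : Int → Int} (hg : Good nds g) {x0 r : Int}
    (hg' : Good nds (Function.update g x0 r)) (hr : g r = r) (hrx : r ≠ x0)
    (hcase : r = Rt nds g x0 ∨ Rt nds g x0 = x0) :
    ∀ z, Rt nds (Function.update g x0 r) z =
      if Rt nds g z = Rt nds g x0 then Rt nds g r else Rt nds g z := by
  refine good_induction hg' _ ?_ ?_
  · -- z is a fixpoint of the updated map
    intro z hz
    by_cases hzx : z = x0
    · subst hzx
      rw [Function.update_self] at hz
      exact absurd hz hrx
    · have hzu : Function.update g x0 r z = z := hz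
      rw [Function.update_of_ne hzx] at hz
      rw [Rt_of_fix hzu, Rt_of_fix hz]
      rcases hcase with hc | hc
      · split_ifs with h
        · rw [hc, Rt_of_fix (Rt_isFix hg x0)]
          exact h
        · rfl
      · rw [hc, if_neg hzx]
  · -- step
    intro z hz ih
    by_cases hzx : z = x0
    · subst hzx
      rw [Rt_step hg' hz, Function.update_self]
      have hfr : Function.update g z r r = r := by
        rw [Function.update_of_ne hrx]; exact hr
      rw [Rt_of_fix hfr, if_pos rfl, Rt_of_fix hr]
    · have hgz : Function.update g x0 r z = g z := by rw [Function.update_of_ne hzx]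
      have hz' : g z ≠ z := by rwa [hgz] at hz
      rw [Rt_step hg' hz, hgz]
      rw [hgz] at ih
      rw [ih, ← Rt_step hg hz']

theorem pf_insert (p : PySem.Dict Int Int) (k v : Int) :
    pf (p.insert k v) = Function.update (pf p) k v := by
  funext z
  simp [pf, Function.update, PySem.Dict.getD_insert]

-- ===== find / union specifications =====

theorem findA_spec {nds : List Int} :
    ∀ (f : Nat) (p : PySem.Dict Int Int) (x : Int), Good nds (pf p) →
      (∃ d, d < f ∧ (pf p)^[d + 1] x = (pf p)^[d] x) →
      (findA f p x).1 = Rt nds (pf p) x ∧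
      Good nds (pf (findA f p x).2) ∧
      (∀ z, Rt nds (pf (findA f p x).2) z = Rt nds (pf p) z) ∧
      (∀ z, pf (findA f p x).2 z = pf p z ∨ pf (findA f p x).2 z = Rt nds (pf p) z) := by
  intro f
  induction f with
  | zero =>
    rintro p x hg ⟨d, hd, -⟩
    omega
  | succ f ih =>
    rintro p x hg ⟨d, hd, hfix⟩
    by_cases hx : pf p x = x
    · have hne : ¬(p.getD x x ≠ x) := by simpa [pf] using hx
      simp only [findA, if_neg hne]
      exact ⟨(Rt_of_fix hx).symm, hg, by simp, by simp⟩
    · have hne : p.getD x x ≠ x := by simpa [pf] using hx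
      simp only [findA, if_pos hne]
      have hpx : p.getD x x = pf p x := rfl
      -- fuel sufficiency for the recursive call
      obtain ⟨d0, rfl⟩ : ∃ d0, d = d0 + 1 := by
        refine ⟨d - 1, ?_⟩
        rcases Nat.eq_zero_or_pos d with rfl | hdp
        · exfalso; apply hx; simpa using hfix
        · omega
      have hfix' : (pf p)^[d0 + 1] (pf p x) = (pf p)^[d0] (pf p x) := by
        rw [← Function.iterate_succ_apply, ← Function.iterate_succ_apply]
        exact hfix
      obtain ⟨h1, h2, h3, h4⟩ := ih p (pf p x) hg ⟨d0, by omega, hfix'⟩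
      rw [hpx]
      set fr := findA f p (pf p x) with hfr
      have hr1 : fr.1 = Rt nds (pf p) x := by
        rw [h1, ← Rt_step hg hx]
      -- fr.1 is a fixpoint of pf fr.2, distinct from x
      have hrfix : pf p fr.1 = fr.1 := by
        rw [hr1]; exact Rt_isFix hg x
      have hrfix' : pf fr.2 fr.1 = fr.1 := by
        rcases h4 fr.1 with h | h
        · rw [h]; exact hrfix
        · rw [h, hr1, Rt_of_fix (Rt_isFix hg x)]
      have hrnex : fr.1 ≠ x := by
        rw [hr1]; exact Rt_ne_self hg hx
      have hxmem : x ∈ nds := (hg.1 x hx).1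
      have hrmem : fr.1 ∈ nds := by
        rw [hr1]; exact Rt_mem hg x hxmem
      have hgx' : pf fr.2 x ≠ x := by
        rcases h4 x with h | h
        · rw [h]; exact hx
        · rw [h, hr1] at *
          exact Rt_ne_self hg hx
      have hupd : pf (fr.2.insert x fr.1) = Function.update (pf fr.2) x fr.1 := pf_insert _ _ _
      have hgood' : Good nds (Function.update (pf fr.2) x fr.1) :=
        ⟨Closed_update h2.1 hxmem hrmem, Acy_update_compress h2 hrfix' hrnex hgx'⟩
      have hcase : fr.1 = Rt nds (pf fr.2) x ∨ Rt nds (pf fr.2) x = x := Or.inl (by rw [h3, hr1])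
      have hRt := Rt_update h2 hgood' hrfix' hrnex hcase
      refine ⟨hr1, by rwa [hupd], ?_, ?_⟩
      · intro z
        rw [hupd, hRt z, h3, h3, h3]
        split_ifs with h
        · rw [hr1, Rt_of_fix (Rt_isFix hg x), h]
        · rfl
      · intro z
        rw [hupd]
        by_cases hzx : z = x
        · subst hzx
          rw [Function.update_self]
          exact Or.inr hr1
        · rw [Function.update_of_ne hzx]
          exact h4 z

theorem unionA_spec {nds : List Int} (p : PySem.Dict Int Int) (a b : Int)
    (hg : Good nds (pf p)) (ha : a ∈ nds) (hb : b ∈ nds) :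
    Good nds (pf (unionA (nds.length + 1) p a b)) ∧
    (∀ z, Rt nds (pf (unionA (nds.length + 1) p a b)) z =
      if Rt nds (pf p) z = Rt nds (pf p) b then Rt nds (pf p) a else Rt nds (pf p) z) := by
  have hsuffa : ∃ d, d < nds.length + 1 ∧ (pf p)^[d + 1] a = (pf p)^[d] a := by
    obtain ⟨d, hd, h⟩ := depth_le hg a
    exact ⟨d, by omega, h⟩
  obtain ⟨ha1, ha2, ha3, -⟩ := findA_spec (nds := nds) (nds.length + 1) p a hg hsuffa
  set fa := findA (nds.length + 1) p a with hfa
  have hsuffb : ∃ d, d < nds.length + 1 ∧ (pf fa.2)^[d + 1] b = (pf fa.2)^[d] b := by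
    obtain ⟨d, hd, h⟩ := depth_le ha2 b
    exact ⟨d, by omega, h⟩
  obtain ⟨hb1, hb2, hb3, -⟩ := findA_spec (nds := nds) (nds.length + 1) fa.2 b ha2 hsuffb
  set fb := findA (nds.length + 1) fa.2 b with hfb
  have hb1' : fb.1 = Rt nds (pf p) b := by rw [hb1, ha3]
  have hRt2 : ∀ z, Rt nds (pf fb.2) z = Rt nds (pf p) z := fun z => by rw [hb3, ha3]
  simp only [unionA]
  rw [← hfa, ← hfb]
  by_cases hab : fa.1 ≠ fb.1
  · rw [if_pos hab]
    -- fa.1 and fb.1 are distinct roots of pf fb.2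
    have hrafix : pf fb.2 fa.1 = fa.1 := by
      apply Rt_fix_of_Rt_eq hb2
      rw [hRt2, ha1, Rt_of_fix (Rt_isFix hg a)]
    have hrbfix : pf fb.2 fb.1 = fb.1 := by
      apply Rt_fix_of_Rt_eq hb2
      rw [hRt2, hb1', Rt_of_fix (Rt_isFix hg b)]
    have hamem : fa.1 ∈ nds := by rw [ha1]; exact Rt_mem hg a ha
    have hbmem : fb.1 ∈ nds := by rw [hb1']; exact Rt_mem hg b hb
    have hupd : pf (fb.2.insert fb.1 fa.1) = Function.update (pf fb.2) fb.1 fa.1 := pf_insert _ _ _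
    have hgood : Good nds (Function.update (pf fb.2) fb.1 fa.1) :=
      ⟨Closed_update hb2.1 hbmem hamem, Acy_update_union hb2 hrbfix hrafix hab⟩
    have hRtb : Rt nds (pf fb.2) fb.1 = fb.1 := Rt_of_fix hrbfix
    have hRt := Rt_update hb2 hgood hrafix hab (Or.inr hRtb)
    refine ⟨by rwa [hupd], ?_⟩
    intro z
    rw [hupd, hRt z, hRtb, hRt2, Rt_of_fix hrafix, ha1, ← hb1']
  · rw [if_neg hab]
    push_neg at hab
    refine ⟨hb2, ?_⟩
    intro z
    rw [hRt2]
    split_ifs with h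
    · rw [h, ← hb1', ← hab, ha1]
    · rfl

-- ===== dictionary bookkeeping =====

theorem init_id_getD (l : List Int) :
    ∀ (d : PySem.Dict Int Int), (∀ z, d.getD z z = z) →
      ∀ z, (l.foldl (fun d n => d.insert n n) d).getD z z = z := by
  induction l with
  | nil => intro d h z; exact h z
  | cons n l ih =>
    intro d h z
    rw [List.foldl_cons]
    refine ih _ ?_ z
    intro w
    rw [PySem.Dict.getD_insert]
    split_ifs with hw
    · exact hw.symm
    · exact h w

theorem init_guard_getD (l : List Int) :
    ∀ (d : PySem.Dict Int Int), (∀ z, d.getD z z = z) →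
      ∀ z, (l.foldl (fun d n => if d.contains n then d else d.insert n n) d).getD z z = z := by
  induction l with
  | nil => intro d h z; exact h z
  | cons n l ih =>
    intro d h z
    rw [List.foldl_cons]
    refine ih _ ?_ z
    intro w
    split_ifs with hc
    · exact h w
    · rw [PySem.Dict.getD_insert]
      split_ifs with hw
      · exact hw.symm
      · exact h w

theorem init_guard_nodup (l : List Int) :
    ∀ (d : PySem.Dict Int Int), d.keys.Nodup →
      (l.foldl (fun d n => if d.contains n then d else d.insert n n) d).keys.Nodup := by
  induction l with
  | nil => intro d h; exact h
  | cons n l ih =>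
    intro d h
    rw [List.foldl_cons]
    refine ih _ ?_
    split_ifs with hc
    · exact h
    · exact PySem.Dict.nodup_keys_insert _ _ _ h

theorem init_guard_contains (l : List Int) :
    ∀ (d : PySem.Dict Int Int) (n : Int), n ∈ l ∨ d.contains n = true →
      (l.foldl (fun d n => if d.contains n then d else d.insert n n) d).contains n = true := by
  induction l with
  | nil =>
    intro d n h
    rcases h with h | h
    · cases h
    · exact h
  | cons m l ih =>
    intro d n h
    rw [List.foldl_cons]
    by_cases hc : d.contains m
    · rw [if_pos hc]
      refine ih _ _ ?_
      rcases h with h | h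
      · rcases List.mem_cons.mp h with rfl | h
        · exact Or.inr hc
        · exact Or.inl h
      · exact Or.inr h
    · rw [if_neg hc]
      refine ih _ _ ?_
      rcases h with h | h
      · rcases List.mem_cons.mp h with rfl | h
        · exact Or.inr (by rw [PySem.Dict.contains_insert]; simp)
        · exact Or.inl h
      · exact Or.inr (by rw [PySem.Dict.contains_insert]; simp [h])

theorem init_const_getD (l : List Int) (v : Int) :
    ∀ (d : PySem.Dict Int Int), (∀ z, d.getD z v = v) →
      ∀ z, (l.foldl (fun d n => d.insert n v) d).getD z v = v := by
  induction l with
  | nil => intro d h z; exact h z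
  | cons n l ih =>
    intro d h z
    rw [List.foldl_cons]
    refine ih _ ?_ z
    intro w
    rw [PySem.Dict.getD_insert]
    split_ifs with hw
    · rfl
    · exact h w

theorem init_false_getD (l : List Int) :
    ∀ (d : PySem.Dict Int Bool), (∀ z, d.getD z false = false) →
      ∀ z, (l.foldl (fun d n => d.insert n false) d).getD z false = false := by
  induction l with
  | nil => intro d h z; exact h z
  | cons n l ih =>
    intro d h z
    rw [List.foldl_cons]
    refine ih _ ?_ z
    intro w
    rw [PySem.Dict.getD_insert]
    split_ifs with hw
    · rfl
    · exact h w

-- ===== the relabelling scan of B =====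

theorem relabel_fold_getD (la lb : Int) :
    ∀ (ks : List Int) (c2 : PySem.Dict Int Int), ks.Nodup →
      ∀ z, (ks.foldl (fun c2 k => if c2.getD k k = lb then c2.insert k la else c2) c2).getD z z =
        if z ∈ ks ∧ c2.getD z z = lb then la else c2.getD z z := by
  intro ks
  induction ks with
  | nil => intro c2 _ z; simp
  | cons k ks ih =>
    intro c2 hnd z
    rw [List.foldl_cons]
    have hnd' : ks.Nodup := (List.nodup_cons.mp hnd).2
    have hknotin : k ∉ ks := (List.nodup_cons.mp hnd).1
    rw [ih _ hnd' z]
    by_cases hzk : z = k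
    · subst hzk
      have hz : z ∉ ks := hknotin
      rw [if_neg (by simp [hz])]
      split_ifs with hc h2 h3
      · rw [PySem.Dict.getD_insert, if_pos rfl]
      · exact absurd ⟨List.mem_cons_self, hc⟩ h2
      · exact absurd h3.2 hc
      · rfl
    · have harm : (if c2.getD k k = lb then c2.insert k la else c2).getD z z = c2.getD z z := by
        split_ifs with hc
        · rw [PySem.Dict.getD_insert, if_neg hzk]
        · rfl
      rw [harm]
      by_cases hzm : z ∈ ks
      · simp [hzm, hzk]
      · simp [hzm, hzk]

theorem relabel_fold_keys (la lb : Int) :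
    ∀ (ks : List Int) (c2 : PySem.Dict Int Int), (∀ k ∈ ks, c2.contains k = true) →
      (ks.foldl (fun c2 k => if c2.getD k k = lb then c2.insert k la else c2) c2).keys = c2.keys := by
  intro ks
  induction ks with
  | nil => intro c2 _; rfl
  | cons k ks ih =>
    intro c2 hc
    rw [List.foldl_cons]
    have hck : c2.contains k = true := hc k List.mem_cons_self
    have hkeys : (if c2.getD k k = lb then c2.insert k la else c2).keys = c2.keys := by
      split_ifs with h
      · exact PySem.Dict.keys_insert_of_contains _ _ hck
      · rfl
    rw [ih _ ?_, hkeys]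
    intro k' hk'
    split_ifs with h
    · rw [PySem.Dict.contains_insert]
      simp [hc k' (List.mem_cons_of_mem _ hk')]
    · exact hc k' (List.mem_cons_of_mem _ hk')

-- ===== the per-edge invariant =====

def Inv1 (nds : List Int) (p c : PySem.Dict Int Int) : Prop :=
  Good nds (pf p) ∧ c.keys.Nodup ∧ (∀ n ∈ nds, c.contains n = true) ∧
  (∀ z, c.getD z z = Rt nds (pf p) z)

theorem relabelB_spec (nds : List Int) (p c : PySem.Dict Int Int) (hinv : Inv1 nds p c)
    (la lb : Int) (hlb : lb ∈ nds) :
    ∀ z, (relabelB c la lb).getD z z =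
      if c.getD z z = lb then la else c.getD z z := by
  obtain ⟨hg, hnd, hcont, hrt⟩ := hinv
  intro z
  unfold relabelB
  rw [relabel_fold_getD la lb c.keys c hnd z]
  by_cases hzk : z ∈ c.keys
  · simp [hzk]
  · have hnc : c.contains z = false := by
      rcases Bool.eq_false_or_eq_true (c.contains z) with h | h
      · exact absurd ((PySem.Dict.contains_iff_mem_keys c z).mp h) hzk
      · exact h
    have hzz : c.getD z z = z := PySem.Dict.getD_of_not_contains _ _ hnc
    rw [if_neg (by simp [hzk])]
    rw [hzz]
    have : z ≠ lb := by
      rintro rfl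
      exact hzk ((PySem.Dict.contains_iff_mem_keys c z).mp (hcont z hlb))
    rw [if_neg this]

theorem parity_flip (n : Int) :
    decide (PySem.Int.mod (n + 1) 2 = 1) = !decide (PySem.Int.mod n 2 = 1) := by
  rw [PySem.Int.mod_eq_emod_of_pos (a := n + 1) (by norm_num),
    PySem.Int.mod_eq_emod_of_pos (a := n) (by norm_num)]
  by_cases h : n % 2 = 1
  · simp only [h, decide_true, Bool.not_true, decide_eq_false_iff_not]
    omega
  · simp only [h, decide_false, Bool.not_false, decide_eq_true_eq]
    omega

theorem bump_eq (node count : Int) (od : Bool)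
    (hod : od = decide (PySem.Int.mod count 2 = 1)) (r : Int × Int × Int × Int) :
    bumpA node count r = bumpB node od r := by
  subst hod
  have hn := PySem.Int.mod_two_eq node
  have hc := PySem.Int.mod_two_eq count
  rcases hn with hn | hn <;> rcases hc with hc | hc <;>
    simp only [bumpA, bumpB, hn, hc] <;> norm_num

-- single edge step of phase 1, on all four running states at once
theorem edge_step (nds : List Int) (a b : Int) (ha : a ∈ nds) (hb : b ∈ nds)
    (p c : PySem.Dict Int Int) (hinv : Inv1 nds p c) :
    Inv1 nds (unionA (nds.length + 1) p a b)
      (if c.getD a a ≠ c.getD b b then relabelB c (c.getD a a) (c.getD b b) else c) := by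
  obtain ⟨hg, hnd, hcont, hrt⟩ := hinv
  obtain ⟨hg', hrt'⟩ := unionA_spec p a b hg ha hb
  have hla : c.getD a a = Rt nds (pf p) a := hrt a
  have hlb : c.getD b b = Rt nds (pf p) b := hrt b
  by_cases hab : c.getD a a ≠ c.getD b b
  · rw [if_pos hab]
    have hlbm : c.getD b b ∈ nds := by rw [hlb]; exact Rt_mem hg b hb
    refine ⟨hg', ?_, ?_, ?_⟩
    · unfold relabelB
      rw [relabel_fold_keys _ _ c.keys c
        (fun k hk => (PySem.Dict.contains_iff_mem_keys c k).mpr hk)]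
      exact hnd
    · intro n hn
      rw [PySem.Dict.contains_iff_mem_keys]
      unfold relabelB
      rw [relabel_fold_keys _ _ c.keys c
        (fun k hk => (PySem.Dict.contains_iff_mem_keys c k).mpr hk)]
      exact (PySem.Dict.contains_iff_mem_keys c n).mp (hcont n hn)
    · intro z
      rw [relabelB_spec nds p c ⟨hg, hnd, hcont, hrt⟩ _ _ hlbm z, hrt' z, hrt z, hla, hlb]
  · rw [if_neg hab]
    push_neg at hab
    refine ⟨hg', hnd, hcont, ?_⟩
    intro z
    rw [hrt' z, hrt z]
    split_ifs with h
    · rw [← hla, hab, hlb, h]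
    · rfl

-- degree bookkeeping step for one edge
theorem deg_step (a b : Int) (ec : PySem.Dict Int Int) (od : PySem.Dict Int Bool)
    (hrel : ∀ z, od.getD z false = decide (PySem.Int.mod (ec.getD z 0) 2 = 1)) :
    ∀ z, (((od.insert a (!od.getD a false)).insert b
        (!(od.insert a (!od.getD a false)).getD b false))).getD z false =
      decide (PySem.Int.mod ((((ec.insert a (ec.getD a 0 + 1))).insert b
        ((ec.insert a (ec.getD a 0 + 1)).getD b 0 + 1)).getD z 0) 2 = 1) := by
  intro z
  simp only [PySem.Dict.getD_insert]
  split_ifs with hzb hba hza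
  · rw [parity_flip, parity_flip, hrel a]
  · rw [parity_flip, hrel b]
  · rw [parity_flip, hrel a]
  · exact hrel z

-- phase 1 over the whole edge list
theorem phase1 (nds : List Int) :
    ∀ (es : List (List Int)) (st : PySem.Dict Int Int × PySem.Dict Int Int)
      (c : PySem.Dict Int Int) (od : PySem.Dict Int Bool),
      (∀ e ∈ es, ∃ a ∈ nds, ∃ b ∈ nds, e = [a, b]) →
      Inv1 nds st.1 c →
      (∀ z, od.getD z false = decide (PySem.Int.mod (st.2.getD z 0) 2 = 1)) →
      Inv1 nds (es.foldl (fun st e =>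
          match e with
          | [a, b] =>
            let ec1 := st.2.insert a (st.2.getD a 0 + 1)
            let ec2 := ec1.insert b (ec1.getD b 0 + 1)
            (unionA (nds.length + 1) st.1 a b, ec2)
          | _ => st) st).1
        (es.foldl (fun c e =>
          let a := e.headI
          let b := e.tail.headI
          let la := c.getD a a
          let lb := c.getD b b
          if la ≠ lb then relabelB c la lb else c) c) ∧
      (∀ z, (es.foldl (fun d e =>
          let a := e.headI
          let b := e.tail.headI
          let d1 := d.insert a (!(d.getD a false))
          d1.insert b (!(d1.getD b false))) od).getD z false =
        decide (PySem.Int.mod ((es.foldl (fun st e =>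
          match e with
          | [a, b] =>
            let ec1 := st.2.insert a (st.2.getD a 0 + 1)
            let ec2 := ec1.insert b (ec1.getD b 0 + 1)
            (unionA (nds.length + 1) st.1 a b, ec2)
          | _ => st) st).2.getD z 0) 2 = 1)) := by
  intro es
  induction es with
  | nil => intro st c od _ h1 h2; exact ⟨h1, h2⟩
  | cons e es ih =>
    intro st c od hpre h1 h2
    obtain ⟨a, ha, b, hb, rfl⟩ := hpre e List.mem_cons_self
    rw [List.foldl_cons, List.foldl_cons, List.foldl_cons]
    refine ih _ _ _ (fun e he => hpre e (List.mem_cons_of_mem _ he)) ?_ ?_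
    · exact edge_step nds a b ha hb st.1 c h1
    · exact fun z => deg_step a b st.2 od h2 z

-- phase 2: the two tally dictionaries stay literally equal
theorem phase2 (nds : List Int) (c : PySem.Dict Int Int) (ec : PySem.Dict Int Int)
    (od : PySem.Dict Int Bool)
    (hrel : ∀ z, od.getD z false = decide (PySem.Int.mod (ec.getD z 0) 2 = 1)) :
    ∀ (ns : List Int) (p : PySem.Dict Int Int)
      (info t : PySem.Dict Int (Int × Int × Int × Int)),
      Good nds (pf p) → (∀ z, Rt nds (pf p) z = c.getD z z) → info = t →
      (ns.foldl (fun st node =>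
          ((findA (nds.length + 1) st.1 node).2,
            st.2.insert (findA (nds.length + 1) st.1 node).1
              (bumpA node (ec.getD node 0)
                (st.2.getD (findA (nds.length + 1) st.1 node).1 (0, 0, 0, 0)))))
        (p, info)).2 =
      ns.foldl (fun t node =>
          t.insert (c.getD node node)
            (bumpB node (od.getD node false) (t.getD (c.getD node node) (0, 0, 0, 0)))) t := by
  intro ns
  induction ns with
  | nil => intro p info t _ _ h; exact h
  | cons node ns ih =>
    intro p info t hg hrt hit
    rw [List.foldl_cons, List.foldl_cons]
    have hsuff : ∃ d, d < nds.length + 1 ∧ (pf p)^[d + 1] node = (pf p)^[d] node := by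
      obtain ⟨d, hd, h⟩ := depth_le hg node
      exact ⟨d, by omega, h⟩
    obtain ⟨h1, h2, h3, -⟩ := findA_spec (nds := nds) (nds.length + 1) p node hg hsuff
    refine ih _ _ _ h2 ?_ ?_
    · intro z
      rw [h3 z, hrt z]
    · rw [h1, hrt node, hit, hrel node]
      rw [bump_eq node (ec.getD node 0) _ rfl]

-- counting over the values list
theorem foldl_count_pair (l : List (Int × Int × Int × Int)) :
    ∀ acc : Int × Int,
      l.foldl (fun acc i =>
        (acc.1 + (if (i.1 = 1 ∧ i.2.1 = 0) ∨ (i.1 = 0 ∧ i.2.1 = 1) then 1 else 0),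
         acc.2 + (if (i.2.2.1 = 1 ∧ i.2.2.2 = 0) ∨ (i.2.2.1 = 0 ∧ i.2.2.2 = 1) then 1 else 0))) acc =
      (acc.1 + ((l.filter (fun i =>
          decide ((i.1, i.2.1) = ((1 : Int), (0 : Int)) ∨ (i.1, i.2.1) = (0, 1)))).length : Int),
       acc.2 + ((l.filter (fun i =>
          decide ((i.2.2.1, i.2.2.2) = ((1 : Int), (0 : Int)) ∨ (i.2.2.1, i.2.2.2) = (0, 1)))).length : Int)) := by
  induction l with
  | nil => intro acc; simp
  | cons i l ih =>
    intro acc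
    rw [List.foldl_cons, ih, List.filter_cons, List.filter_cons]
    simp only [Prod.mk.injEq]
    constructor
    · by_cases h : (i.1 = 1 ∧ i.2.1 = 0) ∨ (i.1 = 0 ∧ i.2.1 = 1)
      · rw [if_pos h, if_pos (by simpa using h), List.length_cons]
        push_cast
        ring
      · rw [if_neg h, if_neg (by simpa using h)]
        ring
    · by_cases h : (i.2.2.1 = 1 ∧ i.2.2.2 = 0) ∨ (i.2.2.1 = 0 ∧ i.2.2.2 = 1)
      · rw [if_pos h, if_pos (by simpa using h), List.length_cons]
        push_cast
        ring
      · rw [if_neg h, if_neg (by simpa using h)]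
        ring

-- ===== VERDICT (by name: the statement is the Claim_ definition above) =====
theorem solution_spec : Claim_equal_solution := by
  intro nodes edges hdom hpre
  unfold Spec_solution
  simp only [solution, solution_alt]
  set p0 := nodes.foldl (fun d n => d.insert n n) (PySem.Dict.empty : PySem.Dict Int Int) with hp0def
  set ec0 := nodes.foldl (fun d n => d.insert n (0 : Int)) (PySem.Dict.empty : PySem.Dict Int Int) with hec0def
  set c0 := nodes.foldl (fun d n => if d.contains n then d else d.insert n n) (PySem.Dict.empty : PySem.Dict Int Int) with hc0def
  set st1 := edges.foldl (fun st e =>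
      match e with
      | [a, b] =>
        let ec1 := st.2.insert a (st.2.getD a 0 + 1)
        let ec2 := ec1.insert b (ec1.getD b 0 + 1)
        (unionA (nodes.length + 1) st.1 a b, ec2)
      | _ => st) (p0, ec0) with hst1def
  set c1 := edges.foldl (fun c e =>
      let a := e.headI
      let b := e.tail.headI
      let la := c.getD a a
      let lb := c.getD b b
      if la ≠ lb then relabelB c la lb else c) c0 with hc1def
  set od0 := c1.keys.foldl (fun d n => d.insert n false)
    (PySem.Dict.empty : PySem.Dict Int Bool) with hod0def
  set od1 := edges.foldl (fun d e =>
      let a := e.headI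
      let b := e.tail.headI
      let d1 := d.insert a (!(d.getD a false))
      d1.insert b (!(d1.getD b false))) od0 with hod1def
  -- initial-state facts
  have hid : ∀ z, p0.getD z z = z := by
    rw [hp0def]
    refine init_id_getD nodes _ ?_
    intro z
    simp [PySem.Dict.getD_empty]
  have hgood0 : Good nodes (pf p0) := by
    refine ⟨?_, ⟨fun _ => 0, ?_⟩⟩ <;>
      · intro x hx
        exact absurd (hid x) hx
  have hc0getD : ∀ z, c0.getD z z = z := by
    rw [hc0def]
    refine init_guard_getD nodes _ ?_
    intro z
    simp [PySem.Dict.getD_empty]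
  have hinv0 : Inv1 nodes p0 c0 := by
    refine ⟨hgood0, ?_, ?_, ?_⟩
    · rw [hc0def]
      refine init_guard_nodup nodes _ ?_
      simp [PySem.Dict.keys_empty]
    · intro n hn
      rw [hc0def]
      exact init_guard_contains nodes _ n (Or.inl hn)
    · intro z
      have hpf : pf p0 z = z := hid z
      rw [hc0getD z, Rt_of_fix hpf]
  have hec0 : ∀ z, ec0.getD z 0 = 0 := by
    rw [hec0def]
    refine init_const_getD nodes 0 _ ?_
    intro z
    simp [PySem.Dict.getD_empty]
  have hod0 : ∀ z, od0.getD z false = false := by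
    rw [hod0def]
    refine init_false_getD c1.keys _ ?_
    intro z
    simp [PySem.Dict.getD_empty]
  have hrel0 : ∀ z, od0.getD z false = decide (PySem.Int.mod (ec0.getD z 0) 2 = 1) := by
    intro z
    rw [hod0 z, hec0 z]
    decide
  obtain ⟨hinv1, hrel1⟩ := phase1 nodes edges (p0, ec0) c0 od0 hpre hinv0 hrel0
  rw [← hst1def] at hinv1 hrel1
  rw [← hc1def] at hinv1
  rw [← hod1def] at hrel1
  have h2 := phase2 nodes c1 st1.2 od1 hrel1 nodes st1.1 PySem.Dict.empty PySem.Dict.empty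
    hinv1.1 (fun z => (hinv1.2.2.2 z).symm) rfl
  rw [foldl_count_pair]
  rw [h2]
  simp
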